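-- pv_equiv track=rewrite | github.com/gNutty/ocr_cpi_exp | Extract_Inv.py | get_target_pages
-- ===== SOURCE A (Python) =====
-- def get_target_pages(selection_str, total_pages):
--     """Parse page selection string and return list of pages to process"""
--     selection_str = str(selection_str).lower().replace(" ", "")
--     pages_to_process = set()
--
--     if selection_str == 'all':
--         return list(range(1, total_pages + 1))
--
--     parts = selection_str.split(',')
--     for part in parts:
--         if '-' in part:
--             start_s, end_s = part.split('-')
--             start = int(start_s)
--             end = total_pages if end_s == 'n' else int(end_s)
--             end = min(end, total_pages)
--             if start <= end:
--                 pages_to_process.update(range(start, end + 1))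
--         else:
--             if part.isdigit():
--                 p = int(part)
--                 if 1 <= p <= total_pages:
--                     pages_to_process.add(p)
--
--     return sorted(list(pages_to_process))
-- ===== SOURCE B (Python) =====
-- def get_target_pages(selection_str, total_pages):
--     """Parse page selection string and return list of pages to process"""
--     selection_str = str(selection_str).lower().replace(" ", "")
--
--     if selection_str == 'all':
--         return list(range(1, total_pages + 1))
--
--     # Collect the selection as a list of closed intervals (lo, hi).
--     intervals = []
--     for part in selection_str.split(','):
--         if '-' in part:
--             start_s, end_s = part.split('-')
--             lo = int(start_s)
--             hi = total_pages if end_s == 'n' else int(end_s)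
--         elif part.isdigit() and 1 <= int(part) <= total_pages:
--             lo = hi = int(part)
--         else:
--             continue
--         hi = min(hi, total_pages)
--         if lo <= hi:
--             intervals.append((lo, hi))
--
--     # Sort the intervals by start, then emit each one clipped below the pages
--     # already emitted: the output comes out sorted and duplicate-free with no
--     # set and no final element-wise sort.
--     intervals.sort(key=lambda iv: iv[0])
--     result = []
--     for lo, hi in intervals:
--         first = lo if not result else max(lo, result[-1] + 1)
--         result.extend(range(first, hi + 1))
--     return result
-- ===== Notes on version B (the rewrite author's own statement) =====
-- stated objective: alternative
-- what changed: B replaces A's set-accumulation plus final sorted() by collecting the parsed (start, end) intervals, sorting them by start, and emitting each interval clipped below the pages already emitted, so the result comes out sorted and duplicate-free in one ordered pass with no set and no element-wise sort.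
import Mathlib
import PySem

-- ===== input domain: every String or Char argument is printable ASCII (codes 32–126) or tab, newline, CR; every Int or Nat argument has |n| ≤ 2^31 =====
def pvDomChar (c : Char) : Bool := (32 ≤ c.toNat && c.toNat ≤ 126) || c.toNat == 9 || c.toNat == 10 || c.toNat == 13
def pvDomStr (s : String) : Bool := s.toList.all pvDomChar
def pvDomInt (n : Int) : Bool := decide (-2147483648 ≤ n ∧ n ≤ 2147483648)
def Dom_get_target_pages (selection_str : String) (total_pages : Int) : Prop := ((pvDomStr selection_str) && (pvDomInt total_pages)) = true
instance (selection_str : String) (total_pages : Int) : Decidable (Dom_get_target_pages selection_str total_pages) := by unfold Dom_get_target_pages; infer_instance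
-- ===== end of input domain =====

-- B replaces A's set-accumulation + final sorted() by collecting (start, end) intervals,
-- sorting them by start and emitting each interval clipped below the pages already emitted,
-- so the output is produced already sorted and duplicate-free in one ordered pass (objective: alternative).

-- ===== PORT A =====
-- one loop iteration of A: fold a part into the set of selected pages
def pvA_step (total_pages : Int) (S : PySem.Set Int) (part : String) : PySem.Set Int :=
  if PySem.Str.isIn "-" part then
    match (PySem.Str.split? part "-").getD [] with
    | [start_s, end_s] =>
      match PySem.Int.ofStr? start_s with
      | some start =>
        match (if end_s = "n" then some total_pages else PySem.Int.ofStr? end_s) with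
        | some end0 =>
          let e := min end0 total_pages
          if start ≤ e then PySem.Set.update S (PySem.List.pyRange start (e + 1) 1) else S
        | none => S  -- Python raises ValueError here (outside Pre_)
      | none => S    -- Python raises ValueError here (outside Pre_)
    | _ => S         -- Python raises ValueError (unpack) here (outside Pre_)
  else
    if PySem.Str.strIsdigit part then
      match PySem.Int.ofStr? part with
      | some p => if 1 ≤ p ∧ p ≤ total_pages then PySem.Set.add S p else S
      | none => S    -- unreachable: a digit string parses
    else S

def get_target_pages (selection_str : String) (total_pages : Int) : List Int :=
  let s := PySem.Str.replace (PySem.Str.lower selection_str) " " ""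
  if s = "all" then PySem.List.pyRange 1 (total_pages + 1) 1
  else
    PySem.List.sorted
      (((PySem.Str.split? s ",").getD []).foldl (pvA_step total_pages) PySem.Set.empty)
      (fun x => x) false

-- ===== PORT B =====
-- one loop iteration of B: fold a part into the list of closed intervals (lo, hi);
-- 'continue' is the none case of lohi?
def pvB_step (total_pages : Int) (ivs : List (Int × Int)) (part : String) : List (Int × Int) :=
  let lohi? : Option (Int × Int) :=
    if PySem.Str.isIn "-" part then
      match (PySem.Str.split? part "-").getD [] with
      | [start_s, end_s] =>
        match PySem.Int.ofStr? start_s,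
            (if end_s = "n" then some total_pages else PySem.Int.ofStr? end_s) with
        | some lo, some hi => some (lo, hi)
        | _, _ => none   -- Python raises ValueError here (outside Pre_)
      | _ => none        -- Python raises ValueError (unpack) here (outside Pre_)
    else
      if PySem.Str.strIsdigit part then
        match PySem.Int.ofStr? part with
        | some p => if 1 ≤ p ∧ p ≤ total_pages then some (p, p) else none
        | none => none   -- unreachable: a digit string parses
      else none
  match lohi? with
  | some (lo, hi) =>
    let hi' := min hi total_pages
    if lo ≤ hi' then ivs ++ [(lo, hi')] else ivs
  | none => ivs

-- emit one sorted interval, clipped below the pages already emitted (result[-1])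
def pvB_emit (res : List Int) (iv : Int × Int) : List Int :=
  let lo := if res.isEmpty then iv.1 else max iv.1 (PySem.List.pyGetD res (-1) 0 + 1)
  res ++ PySem.List.pyRange lo (iv.2 + 1) 1

def get_target_pages_alt (selection_str : String) (total_pages : Int) : List Int :=
  let s := PySem.Str.replace (PySem.Str.lower selection_str) " " ""
  if s = "all" then PySem.List.pyRange 1 (total_pages + 1) 1
  else
    let intervals := ((PySem.Str.split? s ",").getD []).foldl (pvB_step total_pages) []
    (PySem.List.sorted intervals (fun iv => iv.1) false).foldl pvB_emit []

-- ===== PRECONDITION & SPEC =====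
-- Pre_ excludes exactly the inputs where Python A raises ValueError: a comma-separated part
-- that contains '-' but does not split into exactly two int()-parseable pieces (second may be 'n').
def Pre_get_target_pages (selection_str : String) (total_pages : Int) : Prop :=
  let s := PySem.Str.replace (PySem.Str.lower selection_str) " " ""
  s = "all" ∨
    ∀ part ∈ (PySem.Str.split? s ",").getD [], PySem.Str.isIn "-" part = true →
      let pieces := (PySem.Str.split? part "-").getD []
      pieces.length = 2 ∧ (PySem.Int.ofStr? (pieces.headD "")).isSome ∧
        (pieces.getLastD "" = "n" ∨ (PySem.Int.ofStr? (pieces.getLastD "")).isSome)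
instance (selection_str : String) (total_pages : Int) : Decidable (Pre_get_target_pages selection_str total_pages) := by unfold Pre_get_target_pages; infer_instance

def pvWitness_get_target_pages : String × Int := ("2-n,1,7-9", 5)

def Spec_get_target_pages (selection_str : String) (total_pages : Int) (out : List Int) : Prop := out = get_target_pages_alt selection_str total_pages
instance (selection_str : String) (total_pages : Int) (out : List Int) : Decidable (Spec_get_target_pages selection_str total_pages out) := by unfold Spec_get_target_pages; infer_instance

-- ===== CLAIM (what is proved, stated in full; the proofs are below) =====
def Claim_equal_get_target_pages : Prop := ∀ (selection_str : String) (total_pages : Int), Dom_get_target_pages selection_str total_pages → Pre_get_target_pages selection_str total_pages → Spec_get_target_pages selection_str total_pages (get_target_pages selection_str total_pages)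

-- ===== LEMMAS AND PROOFS =====

-- p is covered by one of the intervals
def pvCov (ivs : List (Int × Int)) (p : Int) : Prop := ∃ iv ∈ ivs, iv.1 ≤ p ∧ p ≤ iv.2

lemma pvCov_append_singleton (ivs : List (Int × Int)) (iv : Int × Int) (p : Int) :
    pvCov (ivs ++ [iv]) p ↔ pvCov ivs p ∨ (iv.1 ≤ p ∧ p ≤ iv.2) := by
  constructor
  · rintro ⟨iv', hm, h⟩
    rcases List.mem_append.mp hm with h' | h'
    · exact Or.inl ⟨iv', h', h⟩
    · rw [List.mem_singleton.mp h'] at h; exact Or.inr h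
  · rintro (⟨iv', hm, h⟩ | h)
    · exact ⟨iv', List.mem_append_left _ hm, h⟩
    · exact ⟨iv, List.mem_append_right _ (List.mem_singleton_self _), h⟩

-- the two per-part steps stay in lock step
lemma pv_step_sim (total_pages : Int) (part : String) (S : PySem.Set Int) (ivs : List (Int × Int))
    (hnd : S.Nodup) (hmem : ∀ p, p ∈ S ↔ pvCov ivs p) :
    (pvA_step total_pages S part).Nodup ∧
      ∀ p, p ∈ pvA_step total_pages S part ↔ pvCov (pvB_step total_pages ivs part) p := by
  unfold pvA_step pvB_step
  by_cases hdash : PySem.Str.isIn "-" part = true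
  · rw [if_pos hdash, if_pos hdash]
    rcases (PySem.Str.split? part "-").getD [] with _ | ⟨a, _ | ⟨b, _ | _⟩⟩
    all_goals try exact ⟨hnd, hmem⟩
    dsimp only
    cases hs : PySem.Int.ofStr? a with
    | none => exact ⟨hnd, hmem⟩
    | some start =>
      dsimp only
      cases he : (if b = "n" then some total_pages else PySem.Int.ofStr? b) with
      | none => exact ⟨hnd, hmem⟩
      | some end0 =>
        dsimp only
        by_cases hle : start ≤ min end0 total_pages
        · rw [if_pos hle, if_pos hle]
          refine ⟨PySem.Set.nodup_update _ _ hnd, fun p => ?_⟩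
          rw [PySem.Set.mem_update, pvCov_append_singleton, hmem, PySem.List.mem_pyRange_one]
          exact or_congr Iff.rfl (and_congr Iff.rfl Int.lt_add_one_iff)
        · rw [if_neg hle, if_neg hle]; exact ⟨hnd, hmem⟩
  · rw [if_neg hdash, if_neg hdash]
    by_cases hdig : PySem.Str.strIsdigit part = true
    · rw [if_pos hdig, if_pos hdig]
      cases hs : PySem.Int.ofStr? part with
      | none => exact ⟨hnd, hmem⟩
      | some p0 =>
        dsimp only
        by_cases hin : 1 ≤ p0 ∧ p0 ≤ total_pages
        · rw [if_pos hin, if_pos hin]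
          dsimp only
          rw [min_eq_left hin.2, if_pos (le_refl p0)]
          refine ⟨PySem.Set.nodup_add _ _ hnd, fun p => ?_⟩
          rw [PySem.Set.mem_add, pvCov_append_singleton, hmem]
          refine or_congr Iff.rfl ⟨fun h => by omega, fun h => by omega⟩
        · rw [if_neg hin, if_neg hin]; exact ⟨hnd, hmem⟩
    · rw [if_neg hdig, if_neg hdig]; exact ⟨hnd, hmem⟩

lemma pv_fold_sim (total_pages : Int) (parts : List String) (S : PySem.Set Int) (ivs : List (Int × Int))
    (hnd : S.Nodup) (hmem : ∀ p, p ∈ S ↔ pvCov ivs p) :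
    (parts.foldl (pvA_step total_pages) S).Nodup ∧
      ∀ p, p ∈ parts.foldl (pvA_step total_pages) S ↔
        pvCov (parts.foldl (pvB_step total_pages) ivs) p := by
  induction parts generalizing S ivs with
  | nil => exact ⟨hnd, hmem⟩
  | cons part rest ih =>
    obtain ⟨h1, h2⟩ := pv_step_sim total_pages part S ivs hnd hmem
    exact ih _ _ h1 h2

-- in a strictly increasing list every member is at most the last element
lemma pv_le_getLast (l : List Int) (hl : l.Pairwise (· < ·)) (hne : l ≠ []) (q : Int) (hq : q ∈ l) :
    q ≤ l.getLast hne := by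
  induction l with
  | nil => cases hne rfl
  | cons a t ih =>
    cases t with
    | nil => simp at hq; simp [hq]
    | cons b u =>
      rcases List.mem_cons.mp hq with rfl | hq'
      · have := (List.pairwise_cons.mp hl).1 _ (List.getLast_mem (l := b :: u) (by simp))
        simpa [List.getLast_cons] using le_of_lt this
      · have := ih (List.pairwise_cons.mp hl).2 (by simp) hq'
        simpa [List.getLast_cons] using this

lemma pvCov_cons (iv : Int × Int) (l : List (Int × Int)) (p : Int) :
    pvCov (iv :: l) p ↔ (iv.1 ≤ p ∧ p ≤ iv.2) ∨ pvCov l p := by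
  constructor
  · rintro ⟨iv', hm, h⟩
    rcases List.mem_cons.mp hm with rfl | h'
    · exact Or.inl h
    · exact Or.inr ⟨iv', h', h⟩
  · rintro (h | ⟨iv', hm, h⟩)
    · exact ⟨iv, List.mem_cons_self, h⟩
    · exact ⟨iv', List.mem_cons_of_mem _ hm, h⟩

-- invariant for the emit fold over the start-sorted interval list
lemma pv_emit_fold (L : List (Int × Int)) (res : List Int)
    (hsort : L.Pairwise (fun a b => a.1 ≤ b.1))
    (hres : res.Pairwise (· < ·))
    (hdc : ∀ iv ∈ L, ∀ q ∈ res, ∀ p, iv.1 ≤ p → p ≤ q → p ∈ res) :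
    (L.foldl pvB_emit res).Pairwise (· < ·) ∧
      ∀ p, p ∈ L.foldl pvB_emit res ↔ p ∈ res ∨ pvCov L p := by
  induction L generalizing res with
  | nil => exact ⟨hres, fun p => by simp [pvCov]⟩
  | cons iv L ih =>
    obtain ⟨sv, e⟩ := iv
    simp only [List.foldl_cons]
    set lo := (if res.isEmpty then (sv, e).1 else max (sv, e).1 (PySem.List.pyGetD res (-1) 0 + 1)) with hlo
    have hemit : pvB_emit res (sv, e) = res ++ PySem.List.pyRange lo (e + 1) 1 := rfl
    have hlo_ge : sv ≤ lo := by
      by_cases h : res.isEmpty <;> simp [hlo, h]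
    have hlo_empty : res = [] → lo = sv := by
      intro h; simp [hlo, h]
    have hlo_char : ∀ hne : res ≠ [], lo = max sv (res.getLast hne + 1) := by
      intro hne
      rw [hlo, if_neg (by simpa using hne), PySem.List.pyGetD_neg_one res 0 hne]
    have hmem' : ∀ p, p ∈ pvB_emit res (sv, e) ↔ p ∈ res ∨ (sv ≤ p ∧ p ≤ e) := by
      intro p
      rw [hemit, List.mem_append, PySem.List.mem_pyRange_one]
      constructor
      · rintro (h | ⟨h1, h2⟩)
        · exact Or.inl h
        · exact Or.inr ⟨by omega, by omega⟩
      · rintro (h | ⟨h1, h2⟩)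
        · exact Or.inl h
        · by_cases hp : lo ≤ p
          · exact Or.inr ⟨hp, by omega⟩
          · rcases List.eq_nil_or_concat' res with rfl | hne'
            · exact absurd (hlo_empty rfl ▸ h1) (by omega)
            · have hne : res ≠ [] := by rcases hne' with ⟨l', x, rfl⟩; simp
              have hc := hlo_char hne
              have hlast : p ≤ res.getLast hne := by omega
              exact Or.inl (hdc (sv, e) List.mem_cons_self (res.getLast hne)
                (List.getLast_mem hne) p h1 hlast)
    have hsorted' : (pvB_emit res (sv, e)).Pairwise (· < ·) := by
      rw [hemit]
      refine List.pairwise_append.mpr ⟨hres, PySem.List.pairwise_lt_pyRange_one _ _, ?_⟩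
      intro q hq x hx
      have hne : res ≠ [] := fun h => by simp [h] at hq
      have h1 := pv_le_getLast res hres hne q hq
      have h2 := hlo_char hne
      rw [PySem.List.mem_pyRange_one] at hx
      omega
    have hdc' : ∀ iv' ∈ L, ∀ q ∈ pvB_emit res (sv, e), ∀ p, iv'.1 ≤ p → p ≤ q →
        p ∈ pvB_emit res (sv, e) := by
      intro iv' hiv q hq p h1 h2
      have hs_le : sv ≤ iv'.1 := (List.pairwise_cons.mp hsort).1 iv' hiv
      rw [hemit, List.mem_append, PySem.List.mem_pyRange_one] at hq ⊢
      rcases hq with hq | ⟨hq1, hq2⟩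
      · exact Or.inl (hdc iv' (List.mem_cons_of_mem _ hiv) q hq p (by omega) h2)
      · by_cases hp : lo ≤ p
        · exact Or.inr ⟨hp, by omega⟩
        · rcases List.eq_nil_or_concat' res with rfl | hne'
          · exact absurd (hlo_empty rfl) (by omega)
          · have hne : res ≠ [] := by rcases hne' with ⟨l', x, rfl⟩; simp
            have hc := hlo_char hne
            have hlast : p ≤ res.getLast hne := by omega
            exact Or.inl (hdc iv' (List.mem_cons_of_mem _ hiv) (res.getLast hne)
              (List.getLast_mem hne) p (by omega) hlast)
    obtain ⟨P1, P2⟩ := ih (pvB_emit res (sv, e)) (List.pairwise_cons.mp hsort).2 hsorted' hdc'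
    refine ⟨P1, fun p => ?_⟩
    rw [P2, hmem' p, pvCov_cons]
    tauto

-- ===== VERDICT (by name: the statement is the Claim_ definition above) =====
theorem get_target_pages_spec : Claim_equal_get_target_pages := by
  intro selection_str total_pages _ _
  unfold Spec_get_target_pages get_target_pages get_target_pages_alt
  by_cases hall : PySem.Str.replace (PySem.Str.lower selection_str) " " "" = "all"
  · rw [if_pos hall, if_pos hall]
  · rw [if_neg hall, if_neg hall]
    obtain ⟨hndS, hmemS⟩ := pv_fold_sim total_pages
      ((PySem.Str.split? (PySem.Str.replace (PySem.Str.lower selection_str) " " "") ",").getD [])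
      PySem.Set.empty [] List.nodup_nil (fun p => by simp [pvCov, PySem.Set.empty])
    set parts := (PySem.Str.split? (PySem.Str.replace (PySem.Str.lower selection_str) " " "") ",").getD []
    set S := parts.foldl (pvA_step total_pages) PySem.Set.empty
    set ivs := parts.foldl (pvB_step total_pages) []
    -- A's side: the sorted set
    have permA := PySem.List.sorted_perm S (fun x => x) false
    have pairA_le := PySem.List.sorted_pairwise S (fun x => x)
    have nodupA : (PySem.List.sorted S (fun x => x) false).Nodup := permA.nodup_iff.mpr hndS
    have pairA : (PySem.List.sorted S (fun x => x) false).Pairwise (· < ·) :=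
      (pairA_le.and nodupA).imp (fun h => lt_of_le_of_ne h.1 h.2)
    -- B's side: the emit fold over the start-sorted intervals
    have permL := PySem.List.sorted_perm ivs (fun iv => iv.1) false
    have pairL := PySem.List.sorted_pairwise ivs (fun iv => iv.1)
    obtain ⟨pairB, memB⟩ := pv_emit_fold (PySem.List.sorted ivs (fun iv => iv.1) false) []
      pairL List.Pairwise.nil (by simp)
    have nodupB : ((PySem.List.sorted ivs (fun iv => iv.1) false).foldl pvB_emit []).Nodup :=
      pairB.imp (fun h => ne_of_lt h)
    -- same members on both sides
    have hsame : ∀ p, p ∈ PySem.List.sorted S (fun x => x) false ↔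
        p ∈ (PySem.List.sorted ivs (fun iv => iv.1) false).foldl pvB_emit [] := by
      intro p
      rw [permA.mem_iff, hmemS, memB]
      simp only [List.not_mem_nil, false_or]
      constructor
      · rintro ⟨iv, hm, h⟩; exact ⟨iv, permL.mem_iff.mpr hm, h⟩
      · rintro ⟨iv, hm, h⟩; exact ⟨iv, permL.mem_iff.mp hm, h⟩
    exact List.Perm.eq_of_pairwise (fun a b _ _ h1 h2 => absurd h2 (lt_asymm h1)) pairA pairB
      ((List.perm_ext_iff_of_nodup nodupA nodupB).mpr hsame)
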